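-- pv_equiv track=rewrite | github.com/skrajup/dsa-pp | dp/PaintHouse/op3_dp_space_optimized.py | distinctColoring
-- ===== SOURCE A (Python) =====
-- def distinctColoring (N, r, g, b):
--     dp = [r[0],g[0],b[0]]
--
--     for i in range(1,N):
--         curr = [0,0,0]
--         curr[0] = r[i]+min(dp[1], dp[2])
--         curr[1] = g[i]+min(dp[0], dp[2])
--         curr[2] = b[i]+min(dp[0], dp[1])
--         dp = curr
--
--     return min(dp)
-- ===== SOURCE B (Python) =====
-- def _oadd(x, y):
--     # tropical addition; None acts as +infinity
--     if x is None or y is None: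
--         return None
--     return x + y
--
--
-- def _omin(x, y):
--     # tropical min; None acts as +infinity
--     if x is None:
--         return y
--     if y is None:
--         return x
--     return x if x <= y else y
--
--
-- def _mmul(A, B):
--     # min-plus product of 3x3 matrices over Int ∪ {+infinity} (None);
--     # each entry is min over j of A[p][j] + B[j][c], accumulated left to right
--     B0, B1, B2 = B
--     out = []
--     for p in range(3):
--         a0, a1, a2 = A[p]
--         row = []
--         for c in range(3):
--             b0 = B0[c]
--             b1 = B1[c]
--             b2 = B2[c]
--             best = None
--             if a0 is not None and b0 is not None:
--                 best = a0 + b0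
--             if a1 is not None and b1 is not None:
--                 s = a1 + b1
--                 if best is None or s < best:
--                     best = s
--             if a2 is not None and b2 is not None:
--                 s = a2 + b2
--                 if best is None or s < best:
--                     best = s
--             row.append(best)
--         out.append(row)
--     return out
--
--
-- _ID = [[0, None, None], [None, 0, None], [None, None, 0]]
--
--
-- def _house(ri, gi, bi):
--     # transition matrix of one house: previous color p -> this color c, c != p
--     return [[None, gi, bi], [ri, None, bi], [ri, gi, None]]
--
--
-- def _prod(mats, lo, hi):
--     # balanced divide-and-conquer product of mats[lo:hi]
--     # (min-plus matrix multiplication is associative)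
--     if hi - lo == 0:
--         return _ID
--     if hi - lo == 1:
--         return mats[lo]
--     mid = (lo + hi) // 2
--     return _mmul(_prod(mats, lo, mid), _prod(mats, mid, hi))
--
--
-- def distinctColoring(N, r, g, b):
--     v0 = [r[0], g[0], b[0]]
--     mats = [_house(r[i], g[i], b[i]) for i in range(1, N)]
--     M = _prod(mats, 0, len(mats))
--     ans = None
--     for c in range(3):
--         for p in range(3):
--             ans = _omin(ans, _oadd(v0[p], M[p][c]))
--     return ans
-- ===== Notes on version B (the rewrite author's own statement) =====
-- stated objective: alternative
-- what changed: Replaces the rolling three-state DP loop by an algebraic reformulation: each house 1..N-1 becomes a 3x3 transition matrix over the (min,+) tropical semiring (with None as +infinity), the matrices are combined by a balanced divide-and-conquer product (min-plus multiplication is associative), and the answer is the house-0 cost vector multiplied through the product matrix, minimized over all entries.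
import Mathlib
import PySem

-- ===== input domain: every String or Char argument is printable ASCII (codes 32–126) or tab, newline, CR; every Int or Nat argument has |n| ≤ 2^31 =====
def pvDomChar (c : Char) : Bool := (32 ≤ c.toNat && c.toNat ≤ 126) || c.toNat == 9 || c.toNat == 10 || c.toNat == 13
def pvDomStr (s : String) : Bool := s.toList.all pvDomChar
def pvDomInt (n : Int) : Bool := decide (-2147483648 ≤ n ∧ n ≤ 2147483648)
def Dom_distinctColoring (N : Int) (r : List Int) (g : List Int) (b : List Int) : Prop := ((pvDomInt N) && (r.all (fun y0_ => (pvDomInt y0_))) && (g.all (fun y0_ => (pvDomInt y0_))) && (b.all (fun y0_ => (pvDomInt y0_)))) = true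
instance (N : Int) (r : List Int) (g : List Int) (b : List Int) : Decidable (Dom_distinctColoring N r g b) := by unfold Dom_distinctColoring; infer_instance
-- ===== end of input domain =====

-- B replaces A's rolling three-state DP loop by a (min,+) tropical-semiring formulation:
-- per-house 3x3 transition matrices combined by a balanced divide-and-conquer product,
-- then the house-0 cost vector pushed through the product (alternative algorithm, same
-- asymptotic cost); equivalence on Pre_ is proved.

-- ===== PORT A =====
-- forward DP: dp[c] = min cost of houses 0..i with house i painted color c
def distinctColoring (N : Int) (r : List Int) (g : List Int) (b : List Int) : Int :=
  let dp0 : Int × Int × Int :=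
    (PySem.List.pyGetD r 0 0, PySem.List.pyGetD g 0 0, PySem.List.pyGetD b 0 0)
  let dp := (PySem.List.pyRange 1 N 1).foldl
    (fun dp i =>
      (PySem.List.pyGetD r i 0 + min dp.2.1 dp.2.2,
       PySem.List.pyGetD g i 0 + min dp.1 dp.2.2,
       PySem.List.pyGetD b i 0 + min dp.1 dp.2.1)) dp0
  min dp.1 (min dp.2.1 dp.2.2)

-- ===== PORT B =====
-- tropical (min,+) arithmetic over Int ∪ {+infinity}; none = Python's None = +infinity
def pvOadd (x y : Option Int) : Option Int :=
  match x, y with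
  | some a, some b => some (a + b)
  | _, _ => none

def pvOmin (x y : Option Int) : Option Int :=
  match x, y with
  | none, y => y
  | some a, none => some a
  | some a, some b => if a ≤ b then some a else some b

def pvMat : Type := Fin 3 → Fin 3 → Option Int

-- Python's _mmul: entry (p,c) = min over j of A[p][j] + B[j][c], accumulated left to right
-- (the Python inlines the None tests of _oadd/_omin; pvOadd/pvOmin are those same steps)
def pvMmul (A B : pvMat) : pvMat := fun p c =>
  pvOmin (pvOmin (pvOadd (A p 0) (B 0 c)) (pvOadd (A p 1) (B 1 c))) (pvOadd (A p 2) (B 2 c))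

def pvIdM : pvMat := fun p c => if p = c then some 0 else none

-- Python's _house: [[None, gi, bi], [ri, None, bi], [ri, gi, None]]
def pvHouse (ri gi bi : Int) : pvMat := fun p c =>
  if p = c then none else if c = 0 then some ri else if c = 1 then some gi else some bi

-- Python's _prod: balanced divide-and-conquer product of mats[lo:hi], mid = (lo+hi)//2;
-- here the same split of the same list, written with take/drop at length/2
def pvProd : List pvMat → pvMat
  | [] => pvIdM
  | [m] => m
  | m1 :: m2 :: rest =>
      pvMmul (pvProd ((m1 :: m2 :: rest).take ((m1 :: m2 :: rest).length / 2)))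
             (pvProd ((m1 :: m2 :: rest).drop ((m1 :: m2 :: rest).length / 2)))
termination_by ms => ms.length
decreasing_by
  · simp [List.length_take]; omega
  · simp; omega

def distinctColoring_alt (N : Int) (r : List Int) (g : List Int) (b : List Int) : Int :=
  let v0 : Fin 3 → Option Int := fun p =>
    if p = 0 then some (PySem.List.pyGetD r 0 0)
    else if p = 1 then some (PySem.List.pyGetD g 0 0)
    else some (PySem.List.pyGetD b 0 0)
  let mats := (PySem.List.pyRange 1 N 1).map
    (fun i => pvHouse (PySem.List.pyGetD r i 0) (PySem.List.pyGetD g i 0) (PySem.List.pyGetD b i 0))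
  let M := pvProd mats
  let ans := (List.finRange 3).foldl
    (fun a c => (List.finRange 3).foldl (fun a p => pvOmin a (pvOadd (v0 p) (M p c))) a) none
  ans.getD 0  -- Python's `return ans`; ans is never None (the product matrix keeps every row finite somewhere)

-- ===== PRECONDITION & SPEC =====
-- exactly the inputs where Python A returns (indices 0 and 1..N-1 in range of all three lists)
def Pre_distinctColoring (N : Int) (r : List Int) (g : List Int) (b : List Int) : Prop :=
  r ≠ [] ∧ g ≠ [] ∧ b ≠ [] ∧
  (N ≤ 1 ∨ (N ≤ (r.length : Int) ∧ N ≤ (g.length : Int) ∧ N ≤ (b.length : Int)))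
instance (N : Int) (r : List Int) (g : List Int) (b : List Int) : Decidable (Pre_distinctColoring N r g b) := by unfold Pre_distinctColoring; infer_instance

def pvWitness_distinctColoring : Int × List Int × List Int × List Int :=
  (3, [1, 5, 2], [4, 1, 9], [7, 3, 1])

def Spec_distinctColoring (N : Int) (r : List Int) (g : List Int) (b : List Int) (out : Int) : Prop := out = distinctColoring_alt N r g b
instance (N : Int) (r : List Int) (g : List Int) (b : List Int) (out : Int) : Decidable (Spec_distinctColoring N r g b out) := by unfold Spec_distinctColoring; infer_instance

-- ===== CLAIM (what is proved, stated in full; the proofs are below) =====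
def Claim_equal_distinctColoring : Prop := ∀ (N : Int) (r : List Int) (g : List Int) (b : List Int), Dom_distinctColoring N r g b → Pre_distinctColoring N r g b → Spec_distinctColoring N r g b (distinctColoring N r g b)

-- ===== LEMMAS AND PROOFS =====

@[simp] theorem pvOadd_some (a b : Int) : pvOadd (some a) (some b) = some (a + b) := rfl
@[simp] theorem pvOadd_none_left (y : Option Int) : pvOadd none y = none := rfl
@[simp] theorem pvOadd_none_right (x : Option Int) : pvOadd x none = none := by cases x <;> rfl
@[simp] theorem pvOmin_some (a b : Int) : pvOmin (some a) (some b) = some (min a b) := by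
  simp only [pvOmin, min_def]; split <;> rfl
@[simp] theorem pvOmin_none_left (y : Option Int) : pvOmin none y = y := rfl
@[simp] theorem pvOmin_none_right (x : Option Int) : pvOmin x none = x := by cases x <;> rfl

theorem pvOmin_comm (x y : Option Int) : pvOmin x y = pvOmin y x := by
  cases x <;> cases y <;> simp [min_comm]

theorem pvOmin_assoc (x y z : Option Int) :
    pvOmin (pvOmin x y) z = pvOmin x (pvOmin y z) := by
  cases x <;> cases y <;> cases z <;> simp [min_assoc]

theorem pvOmin_left_comm (x y z : Option Int) :
    pvOmin x (pvOmin y z) = pvOmin y (pvOmin x z) := by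
  rw [← pvOmin_assoc, pvOmin_comm x y, pvOmin_assoc]

theorem pvOadd_assoc (x y z : Option Int) :
    pvOadd (pvOadd x y) z = pvOadd x (pvOadd y z) := by
  cases x <;> cases y <;> cases z <;> simp [add_assoc]

theorem pvOadd_omin_left (x y z : Option Int) :
    pvOadd x (pvOmin y z) = pvOmin (pvOadd x y) (pvOadd x z) := by
  cases x <;> cases y <;> cases z <;> simp [min_add_add_left]

theorem pvOadd_omin_right (x y z : Option Int) :
    pvOadd (pvOmin x y) z = pvOmin (pvOadd x z) (pvOadd y z) := by
  cases x <;> cases y <;> cases z <;> simp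

-- min over the three indices
def pvMin3 (f : Fin 3 → Option Int) : Option Int := pvOmin (pvOmin (f 0) (f 1)) (f 2)

theorem pvOadd_min3 (x : Option Int) (f : Fin 3 → Option Int) :
    pvOadd x (pvMin3 f) = pvMin3 (fun j => pvOadd x (f j)) := by
  simp [pvMin3, pvOadd_omin_left]

theorem pvMin3_oadd (f : Fin 3 → Option Int) (x : Option Int) :
    pvOadd (pvMin3 f) x = pvMin3 (fun j => pvOadd (f j) x) := by
  simp [pvMin3, pvOadd_omin_right]

theorem pvMin3_swap (g : Fin 3 → Fin 3 → Option Int) :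
    pvMin3 (fun j => pvMin3 (fun k => g j k)) = pvMin3 (fun k => pvMin3 (fun j => g j k)) := by
  simp only [pvMin3]
  simp only [pvOmin_assoc, pvOmin_left_comm, pvOmin_comm]

-- vector-matrix product in the tropical semiring
def pvVmul (v : Fin 3 → Option Int) (A : pvMat) : Fin 3 → Option Int :=
  fun c => pvMin3 (fun p => pvOadd (v p) (A p c))

theorem pvVmul_idM (v : Fin 3 → Option Int) : pvVmul v pvIdM = v := by
  funext c
  fin_cases c <;>
    cases hv0 : v 0 <;> cases hv1 : v 1 <;> cases hv2 : v 2 <;>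
      simp [pvVmul, pvMin3, pvIdM, hv0, hv1, hv2, Fin.ext_iff]

theorem pvVmul_mmul (v : Fin 3 → Option Int) (A B : pvMat) :
    pvVmul v (pvMmul A B) = pvVmul (pvVmul v A) B := by
  funext c
  show pvMin3 (fun j => pvOadd (v j) (pvMin3 fun k => pvOadd (A j k) (B k c)))
      = pvMin3 (fun k => pvOadd (pvMin3 fun j => pvOadd (v j) (A j k)) (B k c))
  simp only [pvOadd_min3, pvMin3_oadd, ← pvOadd_assoc]
  exact pvMin3_swap _

theorem pvVmul_prod (ms : List pvMat) : ∀ v, pvVmul v (pvProd ms) = ms.foldl pvVmul v := by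
  induction ms using pvProd.induct with
  | case1 => intro v; simp [pvProd, pvVmul_idM]
  | case2 m => intro v; simp [pvProd]
  | case3 m1 m2 rest ih1 ih2 =>
    intro v
    rw [pvProd, pvVmul_mmul, ih1, ih2, ← List.foldl_append, List.take_append_drop]

-- bridge to A's Int-triple DP state
def pvInj (t : Int × Int × Int) : Fin 3 → Option Int := fun p =>
  if p = 0 then some t.1 else if p = 1 then some t.2.1 else some t.2.2

theorem pvVmul_house (t : Int × Int × Int) (x y z : Int) :
    pvVmul (pvInj t) (pvHouse x y z)
      = pvInj (x + min t.2.1 t.2.2, y + min t.1 t.2.2, z + min t.1 t.2.1) := by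
  funext c
  fin_cases c <;>
    simp [pvVmul, pvMin3, pvHouse, pvInj, Fin.ext_iff] <;> omega

theorem pvFoldl_inj (r g b : List Int) (l : List Int) : ∀ t : Int × Int × Int,
    (l.map (fun i => pvHouse (PySem.List.pyGetD r i 0) (PySem.List.pyGetD g i 0) (PySem.List.pyGetD b i 0))).foldl
        pvVmul (pvInj t)
      = pvInj (l.foldl (fun dp i =>
          (PySem.List.pyGetD r i 0 + min dp.2.1 dp.2.2,
           PySem.List.pyGetD g i 0 + min dp.1 dp.2.2,
           PySem.List.pyGetD b i 0 + min dp.1 dp.2.1)) t) := by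
  induction l with
  | nil => intro t; rfl
  | cons i l ih => intro t; simp only [List.map_cons, List.foldl_cons, pvVmul_house, ih]

theorem pvFinRange3 : List.finRange 3 = [0, 1, 2] := rfl

theorem pvMin3_inj (t : Int × Int × Int) :
    pvMin3 (pvInj t) = some (min t.1 (min t.2.1 t.2.2)) := by
  simp [pvMin3, pvInj, min_assoc]

theorem pvLoop_eq (v : Fin 3 → Option Int) (M : pvMat) :
    (List.finRange 3).foldl
        (fun a c => (List.finRange 3).foldl (fun a p => pvOmin a (pvOadd (v p) (M p c))) a) none
      = pvMin3 (pvVmul v M) := by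
  simp only [pvFinRange3, List.foldl_cons, List.foldl_nil, pvMin3, pvVmul,
    pvOmin_none_left]
  simp only [pvOmin_assoc, pvOmin_left_comm, pvOmin_comm]

theorem distinctColoring_eq_alt (N : Int) (r g b : List Int) :
    distinctColoring N r g b = distinctColoring_alt N r g b := by
  unfold distinctColoring distinctColoring_alt
  dsimp only
  have hv0 : ∀ p : Fin 3,
      (if p = 0 then some (PySem.List.pyGetD r 0 0)
       else if p = 1 then some (PySem.List.pyGetD g 0 0)
       else some (PySem.List.pyGetD b 0 0))
      = pvInj (PySem.List.pyGetD r 0 0, PySem.List.pyGetD g 0 0, PySem.List.pyGetD b 0 0) p :=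
    fun _ => rfl
  simp only [hv0]
  rw [pvLoop_eq, pvVmul_prod, pvFoldl_inj, pvMin3_inj]
  rfl

-- ===== VERDICT (by name: the statement is the Claim_ definition above) =====
theorem distinctColoring_spec : Claim_equal_distinctColoring := by
  intro N r g b _ _
  unfold Spec_distinctColoring
  exact distinctColoring_eq_alt N r g b
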